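-- pv_equiv track=rewrite | github.com/kataroya/web-risk-cli | url_canonicalizer.py | _generate_path_prefixes
-- ===== SOURCE A (Python) =====
-- def _generate_path_prefixes(path: str, query: str = "") -> list[str]:
--     """Generate path prefix list.
--
--     Includes full path + query, full path only, and /-delimited prefixes.
--     Up to 6 entries.
--     """
--     prefixes = []
--     if query:
--         prefixes.append(f"{path}?{query}")
--     prefixes.append(path)
--
--     # Split path by / and generate prefixes
--     parts = path.split("/")
--     for i in range(1, len(parts)):
--         prefix = "/".join(parts[:i]) + "/"
--         if prefix != path and prefix not in prefixes:
--             prefixes.append(prefix)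
--             if len(prefixes) >= 6:
--                 break
--
--     return prefixes
-- ===== SOURCE B (Python) =====
-- def _generate_path_prefixes(path: str, query: str = "") -> list[str]:
--     """Generate path prefix list.
--
--     Includes full path + query, full path only, and /-delimited prefixes.
--     Up to 6 entries.
--     """
--     head = ([f"{path}?{query}"] if query else []) + [path]
--     # Positions of the slashes that end a proper prefix of the path.  Those
--     # prefixes have pairwise distinct lengths (hence are distinct) and are
--     # shorter than either head entry, so no dedup guard or break is needed:
--     # the 6-entry cap is a single truncation, and only the kept prefixes
--     # are ever sliced out.
--     slashes = [i for i in range(len(path)) if path[i] == "/" and i + 1 != len(path)]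
--     return head + [path[: i + 1] for i in slashes[: 6 - len(head)]]
-- ===== Notes on version B (the rewrite author's own statement) =====
-- stated objective: simpler
-- what changed: B replaces A's split/re-join loop with its stateful dedup guard and break by two comprehensions: it collects the indices of slashes ending a proper prefix, truncates that index list to the 6-entry cap, and slices out only the kept prefixes; the membership test and break disappear because those prefixes have pairwise distinct lengths and are shorter than the head entries.
import Mathlib
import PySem

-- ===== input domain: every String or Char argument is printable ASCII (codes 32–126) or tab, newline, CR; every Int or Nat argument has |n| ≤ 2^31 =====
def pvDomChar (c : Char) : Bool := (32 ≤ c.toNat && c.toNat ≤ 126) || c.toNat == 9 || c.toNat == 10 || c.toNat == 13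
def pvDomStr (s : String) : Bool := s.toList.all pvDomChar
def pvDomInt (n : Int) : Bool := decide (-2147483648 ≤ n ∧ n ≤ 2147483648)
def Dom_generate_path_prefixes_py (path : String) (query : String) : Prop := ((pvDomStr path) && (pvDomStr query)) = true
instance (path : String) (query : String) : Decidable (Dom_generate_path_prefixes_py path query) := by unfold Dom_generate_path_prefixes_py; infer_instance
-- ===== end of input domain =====

-- B replaces A's split-into-parts / re-join / dedup-and-break loop by a closed comprehension:
-- the slash-delimited proper prefixes are sliced out directly and the 6-cap is one truncation
-- (correct because those prefixes have pairwise distinct lengths, so the dedup guard is vacuous).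

-- ===== PORT A =====
-- the for-loop over range(1, len(parts)) with its append / 'break' (break = early return)
def pyA_loop (path : List Char) (parts : List (List Char)) : List Int → List (List Char) → List (List Char)
  | [], prefixes => prefixes
  | i :: is, prefixes =>
    -- prefix = "/".join(parts[:i]) + "/"
    let pr := PySem.Chars.join ['/'] (PySem.List.slice parts none (some i)) ++ ['/']
    if pr ≠ path ∧ pr ∉ prefixes then
      if 6 ≤ (prefixes ++ [pr]).length then prefixes ++ [pr]
      else pyA_loop path parts is (prefixes ++ [pr])
    else pyA_loop path parts is prefixes

def generate_path_prefixes_py (path : String) (query : String) : List String :=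
  let p := path.toList
  let q := query.toList
  let prefixes : List (List Char) := []
  let prefixes := if q ≠ [] then prefixes ++ [p ++ ['?'] ++ q] else prefixes  -- f"{path}?{query}"
  let prefixes := prefixes ++ [p]
  let parts := PySem.Chars.splitOn p ['/']                                    -- path.split("/")
  (pyA_loop p parts (PySem.List.pyRange 1 (parts.length : Int) 1) prefixes).map String.ofList

-- ===== PORT B =====
-- '[i for i in range(len(path)) if path[i] == "/" and i + 1 != len(path)]'
def pyB_slashes (p : List Char) : List Nat :=
  (List.range p.length).filter (fun i => decide (p[i]? = some '/' ∧ i + 1 ≠ p.length))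

-- head + [path[:i+1] for i in slashes[:6-len(head)]]
def generate_path_prefixes_py_alt (path : String) (query : String) : List String :=
  let p := path.toList
  let q := query.toList
  let head := (if q ≠ [] then [p ++ ['?'] ++ q] else []) ++ [p]
  ((head ++ ((pyB_slashes p).take (6 - head.length)).map (fun i => p.take (i + 1))).map String.ofList)

-- ===== PRECONDITION & SPEC =====
def Spec_generate_path_prefixes_py (path : String) (query : String) (out : List String) : Prop := out = generate_path_prefixes_py_alt path query
instance (path : String) (query : String) (out : List String) : Decidable (Spec_generate_path_prefixes_py path query out) := by unfold Spec_generate_path_prefixes_py; infer_instance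

-- ===== CLAIM (what is proved, stated in full; the proofs are below) =====
def Claim_equal_generate_path_prefixes_py : Prop := ∀ (path : String) (query : String), Dom_generate_path_prefixes_py path query → Spec_generate_path_prefixes_py path query (generate_path_prefixes_py path query)

-- ===== LEMMAS AND PROOFS =====

-- canonical recursive form of path.split("/")
def consHead (c : Char) : List (List Char) → List (List Char)
  | [] => [[c]]
  | h :: t => (c :: h) :: t

def mySplit : List Char → List (List Char)
  | [] => [[]]
  | c :: cs => if c = '/' then [] :: mySplit cs else consHead c (mySplit cs)

-- prefixes of s ending at each '/' of s, in order
def slashCands : List Char → List (List Char)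
  | [] => []
  | c :: cs => if c = '/' then [c] :: (slashCands cs).map (c :: ·) else (slashCands cs).map (c :: ·)

-- common loop shape: cap checked BEFORE each candidate
def core (path : List Char) : List (List Char) → List (List Char) → List (List Char)
  | [], pfx => pfx
  | c :: cs, pfx =>
    if 6 ≤ pfx.length then pfx
    else if c ≠ path ∧ c ∉ pfx then core path cs (pfx ++ [c]) else core path cs pfx

-- A's loop shape over an explicit candidate list: cap checked AFTER an append
def stepAfter (path : List Char) : List (List Char) → List (List Char) → List (List Char)
  | [], pfx => pfx
  | c :: cs, pfx =>
    if c ≠ path ∧ c ∉ pfx then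
      if 6 ≤ (pfx ++ [c]).length then pfx ++ [c] else stepAfter path cs (pfx ++ [c])
    else stepAfter path cs pfx

def prepHead (p : List Char) : List (List Char) → List (List Char)
  | [] => [p]
  | h :: t => (p ++ h) :: t

theorem mySplit_ne_nil (s : List Char) : mySplit s ≠ [] := by
  cases s with
  | nil => simp [mySplit]
  | cons c cs =>
    simp only [mySplit]
    split
    · simp
    · cases h : mySplit cs <;> simp [consHead]

theorem prepHead_nil (ls : List (List Char)) (h : ls ≠ []) : prepHead [] ls = ls := by
  cases ls with
  | nil => exact absurd rfl h
  | cons a t => simp [prepHead]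

theorem prepHead_consHead (p : List Char) (c : Char) (ls : List (List Char)) :
    prepHead p (consHead c ls) = prepHead (p ++ [c]) ls := by
  cases ls <;> simp [prepHead, consHead]

theorem splitOn_go_eq (fuel : Nat) (l cur : List Char) (acc : List (List Char))
    (h : l.length < fuel) :
    PySem.Chars.splitOn.go ['/'] fuel l cur acc = acc.reverse ++ prepHead cur.reverse (mySplit l) := by
  induction fuel generalizing l cur acc with
  | zero => omega
  | succ n ih =>
    cases l with
    | nil =>
      simp [PySem.Chars.splitOn.go, mySplit, prepHead]
    | cons c rest =>
      by_cases hc : c = '/'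
      · subst hc
        have hpre : List.isPrefixOf ['/'] ('/' :: rest) = true := by
          simp [List.isPrefixOf]
        rw [PySem.Chars.splitOn.go]
        simp only [hpre, if_true]
        have : List.drop (['/'].length) ('/' :: rest) = rest := by simp
        rw [this, ih rest [] (cur.reverse :: acc) (by simp at h; omega)]
        have hmy : mySplit ('/' :: rest) = [] :: mySplit rest := by simp [mySplit]
        rw [hmy]
        simp only [List.reverse_nil]
        rw [prepHead_nil _ (mySplit_ne_nil rest)]
        simp [prepHead]
      · have hpre : List.isPrefixOf ['/'] (c :: rest) = false := by
          simp [List.isPrefixOf]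
          intro hco
          exact absurd hco.symm hc
        rw [PySem.Chars.splitOn.go]
        simp only [hpre, Bool.false_eq_true, if_false]
        rw [ih rest (c :: cur) acc (by simp at h; omega)]
        have hmy : mySplit (c :: rest) = consHead c (mySplit rest) := by simp [mySplit, hc]
        rw [hmy, prepHead_consHead]
        simp

theorem splitOn_eq (s : List Char) : PySem.Chars.splitOn s ['/'] = mySplit s := by
  unfold PySem.Chars.splitOn
  rw [splitOn_go_eq (s.length + 1) s [] [] (Nat.lt_succ_self _)]
  simp [prepHead_nil _ (mySplit_ne_nil s)]

-- intercalate helpers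
theorem intercalate_nil_cons (t : List (List Char)) (h : t ≠ []) :
    List.intercalate ['/'] ([] :: t) = '/' :: List.intercalate ['/'] t := by
  cases t with
  | nil => exact absurd rfl h
  | cons y r => simp [List.intercalate, List.intersperse]

theorem intercalate_head_cons (c : Char) (hd : List Char) (t : List (List Char)) :
    List.intercalate ['/'] ((c :: hd) :: t) = c :: List.intercalate ['/'] (hd :: t) := by
  cases t with
  | nil => simp [List.intercalate]
  | cons y r => simp [List.intercalate, List.intersperse]

def candsA (s : List Char) : List (List Char) :=
  (List.range ((mySplit s).length - 1)).map
    (fun k => PySem.Chars.join ['/'] ((mySplit s).take (k + 1)) ++ ['/'])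

theorem take_ne_nil (k : Nat) (ls : List (List Char)) (h : ls ≠ []) : ls.take (k + 1) ≠ [] := by
  cases ls with
  | nil => exact absurd rfl h
  | cons a t => simp [List.take_succ_cons]

theorem candsA_eq (s : List Char) : candsA s = slashCands s := by
  induction s with
  | nil => simp [candsA, mySplit, slashCands]
  | cons c cs ih =>
    by_cases hc : c = '/'
    · subst hc
      have hmy : mySplit ('/' :: cs) = [] :: mySplit cs := by simp [mySplit]
      have hm : 1 ≤ (mySplit cs).length := by
        cases h : mySplit cs with
        | nil => exact absurd h (mySplit_ne_nil cs)
        | cons a t => simp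
      unfold candsA
      rw [hmy]
      have hlen : ([] :: mySplit cs).length - 1 = ((mySplit cs).length - 1) + 1 := by
        simp; omega
      rw [hlen, List.range_succ_eq_map]
      simp only [List.map_cons, List.map_map]
      have h0 : PySem.Chars.join ['/'] (([] :: mySplit cs).take (0 + 1)) ++ ['/'] = ['/'] := by
        simp [PySem.Chars.join, List.take_succ_cons, List.intercalate]
      rw [h0]
      have hterm : ∀ k, ((fun k => PySem.Chars.join ['/'] (([] :: mySplit cs).take (k + 1)) ++ ['/']) ∘ Nat.succ) k
          = (fun x => '/' :: x) (PySem.Chars.join ['/'] ((mySplit cs).take (k + 1)) ++ ['/']) := by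
        intro k
        simp only [Function.comp, Nat.succ_eq_add_one]
        rw [List.take_succ_cons]
        rw [show PySem.Chars.join ['/'] ([] :: (mySplit cs).take (k + 1))
              = List.intercalate ['/'] ([] :: (mySplit cs).take (k + 1)) from rfl]
        rw [intercalate_nil_cons _ (take_ne_nil k _ (mySplit_ne_nil cs))]
        simp [PySem.Chars.join]
      have hmapped : (List.range ((mySplit cs).length - 1)).map
            ((fun k => PySem.Chars.join ['/'] (([] :: mySplit cs).take (k + 1)) ++ ['/']) ∘ Nat.succ)
          = ((List.range ((mySplit cs).length - 1)).map
              (fun k => PySem.Chars.join ['/'] ((mySplit cs).take (k + 1)) ++ ['/'])).map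
              (fun x => '/' :: x) := by
        rw [List.map_map]
        exact List.map_congr_left (fun k _ => hterm k)
      rw [hmapped]
      rw [show ((List.range ((mySplit cs).length - 1)).map
            (fun k => PySem.Chars.join ['/'] ((mySplit cs).take (k + 1)) ++ ['/'])) = candsA cs from rfl]
      rw [ih]
      simp [slashCands]
    · obtain ⟨hd, t, hps⟩ : ∃ hd t, mySplit cs = hd :: t := by
        cases h : mySplit cs with
        | nil => exact absurd h (mySplit_ne_nil cs)
        | cons a t => exact ⟨a, t, rfl⟩
      have hmy : mySplit (c :: cs) = (c :: hd) :: t := by simp [mySplit, hc, hps, consHead]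
      unfold candsA
      rw [hmy]
      have hterm : ∀ k, PySem.Chars.join ['/'] (((c :: hd) :: t).take (k + 1)) ++ ['/']
          = (fun x => c :: x) (PySem.Chars.join ['/'] ((hd :: t).take (k + 1)) ++ ['/']) := by
        intro k
        rw [List.take_succ_cons, List.take_succ_cons]
        rw [show PySem.Chars.join ['/'] ((c :: hd) :: t.take k)
              = List.intercalate ['/'] ((c :: hd) :: t.take k) from rfl]
        rw [intercalate_head_cons]
        simp [PySem.Chars.join]
      have hlen : ((c :: hd) :: t).length - 1 = (hd :: t).length - 1 := by simp
      rw [hlen]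
      have hmapped : (List.range ((hd :: t).length - 1)).map
            (fun k => PySem.Chars.join ['/'] (((c :: hd) :: t).take (k + 1)) ++ ['/'])
          = ((List.range ((hd :: t).length - 1)).map
              (fun k => PySem.Chars.join ['/'] ((hd :: t).take (k + 1)) ++ ['/'])).map
              (fun x => c :: x) := by
        rw [List.map_map]
        exact List.map_congr_left (fun k _ => hterm k)
      rw [hmapped]
      have hca : ((List.range ((hd :: t).length - 1)).map
            (fun k => PySem.Chars.join ['/'] ((hd :: t).take (k + 1)) ++ ['/'])) = candsA cs := by
        unfold candsA; rw [hps]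
      rw [hca, ih]
      simp [slashCands, hc]

theorem core_of_ge6 (path : List Char) (cs pfx : List (List Char)) (h : 6 ≤ pfx.length) :
    core path cs pfx = pfx := by
  cases cs with
  | nil => rfl
  | cons c cs' => simp [core, h]

theorem stepAfter_eq_core (path : List Char) (cs : List (List Char)) :
    ∀ pfx : List (List Char), pfx.length < 6 → stepAfter path cs pfx = core path cs pfx := by
  induction cs with
  | nil => intro pfx _; rfl
  | cons c cs' ih =>
    intro pfx hlt
    simp only [stepAfter, core, if_neg (by omega : ¬ 6 ≤ pfx.length)]
    by_cases hg : c ≠ path ∧ c ∉ pfx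
    · simp only [if_pos hg]
      by_cases h6 : 6 ≤ (pfx ++ [c]).length
      · rw [if_pos h6, core_of_ge6 _ _ _ h6]
      · rw [if_neg h6]
        exact ih _ (by simp at h6 ⊢; omega)
    · simp only [if_neg hg]
      exact ih _ hlt

theorem pyA_loop_eq_stepAfter (path : List Char) (parts : List (List Char)) (ks : List Nat) :
    ∀ pfx : List (List Char),
      pyA_loop path parts (ks.map (fun k => ((k + 1 : Nat) : Int))) pfx
        = stepAfter path (ks.map (fun k => PySem.Chars.join ['/'] (parts.take (k + 1)) ++ ['/'])) pfx := by
  induction ks with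
  | nil => intro pfx; rfl
  | cons k ks' ih =>
    intro pfx
    simp only [List.map_cons, pyA_loop, stepAfter]
    rw [PySem.List.slice_to_natCast]
    by_cases hg : (PySem.Chars.join ['/'] (parts.take (k + 1)) ++ ['/']) ≠ path
        ∧ (PySem.Chars.join ['/'] (parts.take (k + 1)) ++ ['/']) ∉ pfx
    · simp only [if_pos hg]
      split
      · rfl
      · exact ih _
    · simp only [if_neg hg]
      exact ih _

-- slashCands as a filterMap over slash indices
theorem slashCands_eq_filterMap (s : List Char) :
    slashCands s = (List.range s.length).filterMap
      (fun i => if s[i]? = some '/' then some (s.take (i + 1)) else none) := by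
  induction s with
  | nil => simp [slashCands]
  | cons c cs ih =>
    rw [show (c :: cs).length = cs.length + 1 from rfl, List.range_succ_eq_map]
    rw [List.filterMap_cons, List.filterMap_map]
    have hsucc : ∀ i, ((fun i => if (c :: cs)[i]? = some '/' then some ((c :: cs).take (i + 1)) else none) ∘ Nat.succ) i
        = (fun o => o.map (c :: ·)) (if cs[i]? = some '/' then some (cs.take (i + 1)) else none) := by
      intro i
      simp only [Function.comp, Nat.succ_eq_add_one, List.getElem?_cons_succ]
      split <;> simp [List.take_succ_cons]
    rw [List.filterMap_congr (fun i _ => hsucc i)]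
    rw [show (fun o => Option.map (c :: ·) o) = fun i => Option.map (c :: ·) i from rfl]
    rw [← List.map_filterMap, ← ih]
    by_cases hc : c = '/'
    · subst hc
      simp [slashCands, List.take_succ_cons]
    · have : (c :: cs)[0]? = some c := rfl
      simp [slashCands, hc]

-- the loop with the dedup guard, run on a duplicate-free candidate list, is append + truncate
theorem core_eq_take (path : List Char) (cs : List (List Char)) :
    ∀ pfx : List (List Char), cs.Nodup → pfx.length ≤ 6 →
      core path cs pfx
        = pfx ++ (cs.filter (fun c => decide (c ≠ path ∧ c ∉ pfx))).take (6 - pfx.length) := by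
  induction cs with
  | nil => intro pfx _ _; simp [core]
  | cons c cs' ih =>
    intro pfx hnd hle
    have hnd' : cs'.Nodup := hnd.of_cons
    have hcc : c ∉ cs' := by
      have := List.nodup_cons.mp hnd
      exact this.1
    by_cases h6 : 6 ≤ pfx.length
    · have hlen : pfx.length = 6 := le_antisymm hle h6
      simp [core, hlen]
    · simp only [core, if_neg h6]
      by_cases hg : c ≠ path ∧ c ∉ pfx
      · rw [if_pos hg, ih (pfx ++ [c]) hnd' (by simp; omega)]
        have hfc : cs'.filter (fun c' => decide (c' ≠ path ∧ c' ∉ pfx ++ [c]))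
            = cs'.filter (fun c' => decide (c' ≠ path ∧ c' ∉ pfx)) := by
          apply List.filter_congr
          intro c' hc'
          have hne : c' ≠ c := fun h => hcc (h ▸ hc')
          simp [List.mem_append, hne]
        rw [hfc]
        have hfilter : (c :: cs').filter (fun c' => decide (c' ≠ path ∧ c' ∉ pfx))
            = c :: cs'.filter (fun c' => decide (c' ≠ path ∧ c' ∉ pfx)) := by
          simp [hg.1, hg.2]
        rw [hfilter]
        have h1 : 6 - pfx.length = (6 - (pfx ++ [c]).length) + 1 := by simp; omega
        rw [h1, List.take_succ_cons]
        simp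
      · rw [if_neg hg, ih pfx hnd' hle]
        have hfilter : (c :: cs').filter (fun c' => decide (c' ≠ path ∧ c' ∉ pfx))
            = cs'.filter (fun c' => decide (c' ≠ path ∧ c' ∉ pfx)) := by
          rw [List.filter_cons]
          simp only [decide_eq_true_eq]
          rw [if_neg hg]
        rw [hfilter]

-- slash candidates have pairwise distinct (strictly situated) lengths, hence no duplicates
theorem slashCands_nodup (s : List Char) : (slashCands s).Nodup := by
  rw [slashCands_eq_filterMap]
  apply List.Nodup.filterMap ?_ (List.nodup_range)
  intro i i' b hb hb'
  have hlen : ∀ j : Nat, b ∈ (if s[j]? = some '/' then some (s.take (j + 1)) else none) →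
      b.length = j + 1 := by
    intro j hj
    split at hj
    · next hsl =>
      have hjlt : j < s.length := by
        by_contra hge
        rw [List.getElem?_eq_none (by omega)] at hsl
        simp at hsl
      simp at hj
      subst hj
      simp [List.length_take]
      omega
    · exact absurd hj (by simp)
  have h1 := hlen i hb
  have h2 := hlen i' hb'
  omega

-- the dedup/path guard on a slash candidate reduces to 'the slash is not final'
theorem filter_slashCands (p q : List Char) :
    (slashCands p).filter
        (fun c => decide (c ≠ p ∧ c ∉ (if q ≠ [] then [p ++ ['?'] ++ q] else ([] : List (List Char))) ++ [p]))
      = (List.range p.length).filterMap (fun i =>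
          if p[i]? = some '/' ∧ i + 1 ≠ p.length then some (p.take (i + 1)) else none) := by
  rw [slashCands_eq_filterMap]
  rw [List.filter_filterMap]
  apply List.filterMap_congr
  intro i hi
  have hilt : i < p.length := List.mem_range.mp hi
  by_cases hsl : p[i]? = some '/'
  · rw [if_pos hsl]
    have hlen : (p.take (i + 1)).length = i + 1 := by simp; omega
    by_cases hend : i + 1 = p.length
    · have hp : p.take (i + 1) = p := by rw [hend]; simp
      rw [if_neg (show ¬(p[i]? = some '/' ∧ i + 1 ≠ p.length) from fun h => h.2 hend)]
      simp [Option.filter, hp]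
    · have hne : p.take (i + 1) ≠ p := by
        intro h
        have := congrArg List.length h
        rw [hlen] at this
        omega
      have hne2 : p.take (i + 1) ≠ p ++ '?' :: q := by
        intro h
        have := congrArg List.length h
        rw [hlen] at this
        simp at this
        omega
      rw [if_pos (show (p[i]? = some '/' ∧ i + 1 ≠ p.length) from ⟨hsl, hend⟩)]
      simp [Option.filter, hne, hne2]
  · rw [if_neg hsl, if_neg (show ¬(p[i]? = some '/' ∧ i + 1 ≠ p.length) from fun h => hsl h.1)]
    rfl

-- collecting the kept slices directly = slicing at the collected slash indices
theorem filterMap_eq_map_slashes (p : List Char) :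
    (List.range p.length).filterMap (fun i =>
        if p[i]? = some '/' ∧ i + 1 ≠ p.length then some (p.take (i + 1)) else none)
      = (pyB_slashes p).map (fun i => p.take (i + 1)) := by
  unfold pyB_slashes
  induction (List.range p.length) with
  | nil => rfl
  | cons a l ih =>
    rw [List.filterMap_cons, List.filter_cons]
    by_cases h : (p[a]? = some '/' ∧ a + 1 ≠ p.length) <;> simp [h, ih]

-- ===== VERDICT (by name: the statement is the Claim_ definition above) =====
theorem generate_path_prefixes_py_spec : Claim_equal_generate_path_prefixes_py := by
  intro path query _
  unfold Spec_generate_path_prefixes_py generate_path_prefixes_py generate_path_prefixes_py_alt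
  simp only []
  set p := path.toList with hp
  set q := query.toList with hq
  set pfx0 := ((if q ≠ [] then ([] : List (List Char)) ++ [p ++ ['?'] ++ q] else []) ++ [p]) with hpfx0
  have hlen0 : pfx0.length ≤ 6 := by
    rw [hpfx0]; split <;> simp
  have hlt0 : pfx0.length < 6 := by
    rw [hpfx0]; split <;> simp
  congr 1
  -- rewrite A's index list to a mapped range
  have hrange : PySem.List.pyRange 1 ((PySem.Chars.splitOn p ['/']).length : Int) 1
      = (List.range ((PySem.Chars.splitOn p ['/']).length - 1)).map (fun k => ((k + 1 : Nat) : Int)) := by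
    rw [PySem.List.pyRange_one]
    have hn : (((PySem.Chars.splitOn p ['/']).length : Int) - 1).toNat
        = (PySem.Chars.splitOn p ['/']).length - 1 := by omega
    rw [hn]
    exact List.map_congr_left (fun k _ => by push_cast; ring)
  rw [hrange, pyA_loop_eq_stepAfter, stepAfter_eq_core _ _ _ hlt0]
  have hA : ((List.range ((PySem.Chars.splitOn p ['/']).length - 1)).map
        (fun k => PySem.Chars.join ['/'] ((PySem.Chars.splitOn p ['/']).take (k + 1)) ++ ['/']))
      = candsA p := by
    unfold candsA
    rw [splitOn_eq]
  rw [hA, candsA_eq, core_eq_take p (slashCands p) pfx0 (slashCands_nodup p) hlen0]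
  have hpfx0' : pfx0 = (if q ≠ [] then [p ++ ['?'] ++ q] else ([] : List (List Char))) ++ [p] := by
    rw [hpfx0]; split <;> simp
  rw [hpfx0', filter_slashCands p q, filterMap_eq_map_slashes p]
  rw [List.map_take]
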